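-- pv_equiv track=rewrite | github.com/mjungebl/etree_tag | InfoFileTagger_class.py | _tracks_in_order
-- ===== SOURCE A (Python) =====
-- from typing import Dict, List, Optional, Sequence, Tuple
--
-- TrackEntry = Tuple[int, str, str]  # (disc, track_as_2char_str, title)
--
-- def _tracks_in_order(
--     entries: List[TrackEntry | Tuple[Optional[int], str, str]]
-- ) -> bool:
--     """
--     Pass if either:
--       1) per disc, tracks are consecutive starting at 1, or
--       2) overall strictly increasing track numbers when sorted by (disc, track).
--     """
--     # Condition 1
--     condition1 = True
--     groups: Dict[Optional[int], List[int]] = {}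
--     for disc, track_str, _ in entries:
--         groups.setdefault(disc, []).append(int(track_str))
--     for disc, numbers in groups.items():
--         if disc is not None:
--             numbers.sort()
--             if numbers[0] != 1:
--                 condition1 = False
--                 break
--             for i in range(1, len(numbers)):
--                 if numbers[i] != numbers[i - 1] + 1:
--                     condition1 = False
--                     break
--             if not condition1:
--                 break
--         else:
--             condition1 = False
--             break
--
--     # Condition 2
--     sorted_entries = sorted(
--         entries, key=lambda x: ((int(x[0]) if x[0] is not None else 0), int(x[1]))
--     )
--     condition2 = True
--     for i in range(1, len(sorted_entries)):
--         if int(sorted_entries[i][1]) <= int(sorted_entries[i - 1][1]):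
--             condition2 = False
--             break
--
--     return condition1 or condition2
-- ===== SOURCE B (Python) =====
-- from typing import Dict, List, Optional, Sequence, Tuple
--
-- TrackEntry = Tuple[int, str, str]  # (disc, track_as_2char_str, title)
--
-- def _tracks_in_order(
--     entries: List[TrackEntry | Tuple[Optional[int], str, str]]
-- ) -> bool:
--     # One sort shared by both conditions, then a single fused scan.
--     # After sorting by (disc-or-0, track), condition 1 (per disc, tracks are a
--     # permutation of 1..k, no None disc) holds iff each contiguous equal-disc
--     # block reads 1,2,3,...; condition 2 is strict increase of adjacent tracks.
--     se = sorted(entries, key=lambda x: ((int(x[0]) if x[0] is not None else 0), int(x[1])))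
--     cond1 = True
--     cond2 = True
--     prev = None  # (disc, track_int) of the previous sorted entry
--     for d, t, _ in se:
--         n = int(t)
--         if prev is None:
--             if d is None or n != 1:
--                 cond1 = False
--         else:
--             pd, pn = prev
--             if n <= pn:
--                 cond2 = False
--             if d is None or n != (pn + 1 if d == pd else 1):
--                 cond1 = False
--         prev = (d, n)
--     return cond1 or cond2
-- ===== Notes on version B (the rewrite author's own statement) =====
-- stated objective: alternative
-- what changed: B drops A's dict-grouping pass entirely: it performs the one (disc-or-0, track) sort A already needs for condition 2 and computes both conditions in a single fused linear scan, checking condition 1 as 'each contiguous equal-disc block reads 1,2,3,...' instead of A's per-disc collect-sort-and-adjacency check.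
import Mathlib
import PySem

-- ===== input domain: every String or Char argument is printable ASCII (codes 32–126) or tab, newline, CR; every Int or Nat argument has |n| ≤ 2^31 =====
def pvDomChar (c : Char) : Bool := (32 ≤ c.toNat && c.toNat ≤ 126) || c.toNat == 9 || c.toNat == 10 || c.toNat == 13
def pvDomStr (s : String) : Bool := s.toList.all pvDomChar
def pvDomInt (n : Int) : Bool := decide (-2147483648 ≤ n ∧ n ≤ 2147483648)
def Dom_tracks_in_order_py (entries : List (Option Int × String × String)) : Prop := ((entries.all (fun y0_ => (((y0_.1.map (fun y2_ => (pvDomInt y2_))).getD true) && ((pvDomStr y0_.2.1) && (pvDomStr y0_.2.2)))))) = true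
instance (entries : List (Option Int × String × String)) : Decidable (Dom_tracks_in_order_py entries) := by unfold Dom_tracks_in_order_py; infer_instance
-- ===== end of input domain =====

-- B drops A's dict-grouping: it performs the one (disc-or-0, track) sort A needs for condition 2
-- and computes both conditions in a single fused scan over the sorted list (objective: alternative).


-- shared primitive wrapper: Python int(s); Pre_ excludes the inputs where int() raises ValueError,
-- so the default 0 is never reached on admitted inputs
def pyInt (s : String) : Int := (PySem.Int.ofStr? s).getD 0

-- ===== PORT A =====
-- 'for i in range(1, len(numbers)): if numbers[i] != numbers[i-1] + 1: break' (indices are in range there)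
def consecLoopA (s : List Int) (i : Nat) : Bool :=
  if _h : i < s.length then
    if s.getD i 0 ≠ s.getD (i - 1) 0 + 1 then false else consecLoopA s (i + 1)
  else true
termination_by s.length - i

-- 'for disc, numbers in groups.items(): …' with the three break sites of A
def groupLoopA : List (Option Int × List Int) → Bool
  | [] => true
  | (disc, numbers) :: rest =>
    match disc with
    | some _ =>
      let s := PySem.List.sorted numbers (fun x => x)
      if PySem.List.pyGetD s 0 0 ≠ 1 then false
      else if consecLoopA s 1 = false then false
      else groupLoopA rest
    | none => false

-- 'for i in range(1, len(sorted_entries)): if int(se[i][1]) <= int(se[i-1][1]): break' (indices in range)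
def cond2LoopA (se : List (Option Int × String × String)) (i : Nat) : Bool :=
  if _h : i < se.length then
    if pyInt (se.getD i (none, "", "")).2.1 ≤ pyInt (se.getD (i - 1) (none, "", "")).2.1 then false
    else cond2LoopA se (i + 1)
  else true
termination_by se.length - i

def tracks_in_order_py (entries : List (Option Int × String × String)) : Bool :=
  let groups := entries.foldl
    (fun d e => PySem.Dict.modify d e.1 [] (fun l => l ++ [pyInt e.2.1])) PySem.Dict.empty
  let condition1 := groupLoopA groups.items
  let sorted_entries := PySem.List.sorted2 entries
    (fun x => x.1.getD 0) (fun x => pyInt x.2.1)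
  let condition2 := cond2LoopA sorted_entries 1
  condition1 || condition2

-- ===== PORT B =====
-- loop body of B's single fused scan: state = (cond1, cond2, prev) with prev = None initially
def stepB (st : Bool × Bool × Option (Option Int × Int)) (e : Option Int × String × String) :
    Bool × Bool × Option (Option Int × Int) :=
  let n := pyInt e.2.1
  match st with
  | (c1, c2, none) =>
    (if e.1 = none ∨ n ≠ 1 then false else c1, c2, some (e.1, n))
  | (c1, c2, some (pd, pn)) =>
    (if e.1 = none ∨ n ≠ (if e.1 = pd then pn + 1 else 1) then false else c1,
     if n ≤ pn then false else c2,
     some (e.1, n))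

def tracks_in_order_py_alt (entries : List (Option Int × String × String)) : Bool :=
  let se := PySem.List.sorted2 entries (fun x => x.1.getD 0) (fun x => pyInt x.2.1)
  let r := se.foldl stepB (true, true, none)
  r.1 || r.2.1

-- ===== PRECONDITION & SPEC =====
-- Pre_ excludes exactly the inputs where int(track_str) raises ValueError in A (and in B)
def Pre_tracks_in_order_py (entries : List (Option Int × String × String)) : Prop :=
  ∀ e ∈ entries, (PySem.Int.ofStr? e.2.1).isSome = true
instance (entries : List (Option Int × String × String)) : Decidable (Pre_tracks_in_order_py entries) := by unfold Pre_tracks_in_order_py; infer_instance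
def pvWitness_tracks_in_order_py : (List (Option Int × String × String)) := [(some 1, "1", "a"), (some 1, "2", "b")]

def Spec_tracks_in_order_py (entries : List (Option Int × String × String)) (out : Bool) : Prop := out = tracks_in_order_py_alt entries
instance (entries : List (Option Int × String × String)) (out : Bool) : Decidable (Spec_tracks_in_order_py entries out) := by unfold Spec_tracks_in_order_py; infer_instance

-- ===== CLAIM (what is proved, stated in full; the proofs are below) =====
def Claim_equal_tracks_in_order_py : Prop := ∀ (entries : List (Option Int × String × String)), Dom_tracks_in_order_py entries → Pre_tracks_in_order_py entries → Spec_tracks_in_order_py entries (tracks_in_order_py entries)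

-- ===== LEMMAS AND PROOFS =====

-- proof-side abbreviations for the two sort keys
def key1 (e : Option Int × String × String) : Int := e.1.getD 0
def nOf (e : Option Int × String × String) : Int := pyInt e.2.1

-- the comparator sorted2 uses, and the order its output is Pairwise in
def lexR (a b : Option Int × String × String) : Bool :=
  decide (key1 a < key1 b) || (!decide (key1 b < key1 a) && decide (nOf a < nOf b))

def LexLe (a b : Option Int × String × String) : Prop :=
  key1 a ≤ key1 b ∧ (key1 a = key1 b → nOf a ≤ nOf b)

-- proof-side recursions naming the two flags B's fold computes
def scan1 : (Option Int × Int) → List (Option Int × String × String) → Bool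
  | _, [] => true
  | (pd, pn), e :: r =>
    (!decide (e.1 = none ∨ nOf e ≠ (if e.1 = pd then pn + 1 else 1))) && scan1 (e.1, nOf e) r

def scan2 : Int → List (Option Int × String × String) → Bool
  | _, [] => true
  | pn, e :: r => (!decide (nOf e ≤ pn)) && scan2 (nOf e) r

def good1 : List (Option Int × String × String) → Bool
  | [] => true
  | e :: r => (!decide (e.1 = none ∨ nOf e ≠ 1)) && scan1 (e.1, nOf e) r

def good2 : List (Option Int × String × String) → Bool
  | [] => true
  | e :: r => scan2 (nOf e) r

def trail : (Option Int × Int) → List (Option Int × String × String) → (Option Int × Int)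
  | p, [] => p
  | _, e :: r => trail (e.1, nOf e) r

-- adjacency over a list, structurally (for A's condition-2 loop)
def pairAll (l : List (Option Int × String × String)) : Bool :=
  match l with
  | [] => true
  | [_] => true
  | a :: b :: r => (decide (pyInt a.2.1 < pyInt b.2.1)) && pairAll (b :: r)

-- per-disc group of track ints, and 'is the consecutive run s, s+1, …'
def groupOf (l : List (Option Int × String × String)) (k : Option Int) : List Int :=
  (l.filter (fun e => e.1 == k)).map (fun e => pyInt e.2.1)

def RF (s : Int) (ns : List Int) : Prop := ns = PySem.List.pyRange s (s + ns.length) 1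

-- A's per-group body as a predicate
def perA (p : Option Int × List Int) : Bool :=
  p.1.isSome && decide (PySem.List.sorted p.2 (fun x => x)
    = PySem.List.pyRange 1 ((p.2.length : Int) + 1) 1)

-- ===== reused characterisations of A's loops =====

lemma consecLoopA_iff (s : List Int) :
    ∀ i, consecLoopA s i = true ↔
      ∀ j, i ≤ j → j < s.length → s.getD j 0 = s.getD (j - 1) 0 + 1 := by
  suffices H : ∀ m i, s.length - i ≤ m → (consecLoopA s i = true ↔
      ∀ j, i ≤ j → j < s.length → s.getD j 0 = s.getD (j - 1) 0 + 1) by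
    exact fun i => H s.length i (by omega)
  intro m
  induction m with
  | zero =>
    intro i h
    have hi : ¬ i < s.length := by omega
    rw [consecLoopA, dif_neg hi]
    exact ⟨fun _ j hij hj => absurd hj (by omega), fun _ => rfl⟩
  | succ m ih =>
    intro i h
    rw [consecLoopA]
    by_cases hi : i < s.length
    · rw [dif_pos hi]
      by_cases hcur : s.getD i 0 ≠ s.getD (i - 1) 0 + 1
      · rw [if_pos hcur]
        exact ⟨fun hfalse => absurd hfalse (by simp), fun hall => absurd (hall i le_rfl hi) hcur⟩
      · rw [if_neg hcur]
        rw [ih (i + 1) (by omega)]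
        constructor
        · intro hall j hij hj
          rcases Nat.eq_or_lt_of_le hij with rfl | hlt
          · exact not_ne_iff.mp hcur
          · exact hall j hlt hj
        · intro hall j hij hj; exact hall j (by omega) hj
    · rw [dif_neg hi]
      exact ⟨fun _ j hij hj => absurd hj (by omega), fun _ => rfl⟩

-- head = 1 plus adjacency means the sorted list IS range(1, n+1)
lemma sorted_eq_range_iff (s : List Int) (hne : s ≠ []) :
    (s.getD 0 0 = 1 ∧ consecLoopA s 1 = true) ↔
      s = PySem.List.pyRange 1 ((s.length : Int) + 1) 1 := by
  have hlenR : (PySem.List.pyRange 1 ((s.length : Int) + 1) 1).length = s.length := by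
    rw [PySem.List.length_pyRange_one]; omega
  constructor
  · rintro ⟨h0, hc⟩
    have hgetD : ∀ j, j < s.length → s.getD j 0 = 1 + j := by
      intro j
      induction j with
      | zero => intro _; simpa using h0
      | succ k ihk =>
        intro hk
        have := (consecLoopA_iff s 1).mp hc (k + 1) (by omega) hk
        rw [this]
        simp only [Nat.add_sub_cancel]
        rw [ihk (by omega)]
        push_cast; ring
    apply List.ext_getElem (by omega)
    intro j hj hj2
    rw [PySem.List.getElem_pyRange_one]
    have := hgetD j hj
    rwa [List.getD_eq_getElem _ _ hj] at this
  · intro hs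
    have hlen : 0 < s.length := List.length_pos_of_ne_nil hne
    have hval : ∀ j, j < s.length → s.getD j 0 = 1 + j := by
      intro j hj
      rw [List.getD_eq_getElem _ _ hj, List.getElem_of_eq hs hj,
        PySem.List.getElem_pyRange_one]
    constructor
    · have := hval 0 hlen; simpa using this
    · rw [consecLoopA_iff]
      intro j h1 hj
      rw [hval j hj, hval (j - 1) (by omega)]
      have : ((j - 1 : Nat) : Int) = (j : Int) - 1 := by omega
      rw [this]; ring

-- the per-group body of A's items loop is perA, on nonempty groups
lemma perGroup_eq (disc : Option Int) (nums : List Int) (hne : nums ≠ []) :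
    (match disc with
      | some _ =>
        let s := PySem.List.sorted nums (fun x => x)
        if PySem.List.pyGetD s 0 0 ≠ 1 then false
        else if consecLoopA s 1 = false then false else true
      | none => false) = perA (disc, nums) := by
  cases disc with
  | none => simp [perA]
  | some d =>
    simp only [perA, Option.isSome_some, Bool.true_and]
    set s := PySem.List.sorted nums (fun x => x) with hs
    have hlen : s.length = nums.length := (PySem.List.sorted_perm nums (fun x => x) false).length_eq
    have hsne : s ≠ [] := by
      intro h; exact hne ((PySem.List.sorted_eq_nil_iff nums (fun x => x) false).mp h)
    rw [Bool.eq_iff_iff]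
    constructor
    · intro h
      by_cases h0 : PySem.List.pyGetD s 0 0 ≠ 1
      · rw [if_pos h0] at h; exact absurd h (by simp)
      · rw [if_neg h0] at h
        by_cases h1 : consecLoopA s 1 = false
        · rw [if_pos h1] at h; exact absurd h (by simp)
        · have h0' : s.getD 0 0 = 1 := by
            have := not_ne_iff.mp h0
            rwa [PySem.List.pyGetD_zero] at this
          have h1' : consecLoopA s 1 = true := by
            cases hb : consecLoopA s 1 with
            | false => exact absurd hb h1
            | true => rfl
          have := (sorted_eq_range_iff s hsne).mp ⟨h0', h1'⟩
          rw [hlen] at this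
          simp only [decide_eq_true_eq]
          exact this
    · intro h
      have hsr : s = PySem.List.pyRange 1 ((nums.length : Int) + 1) 1 := by
        simpa using h
      have : s = PySem.List.pyRange 1 ((s.length : Int) + 1) 1 := by rw [hlen]; exact hsr
      obtain ⟨h0, h1⟩ := (sorted_eq_range_iff s hsne).mpr this
      rw [if_neg (by rw [PySem.List.pyGetD_zero]; exact not_ne_iff.mpr h0), if_neg (by simp [h1])]

-- A's items loop is the all() of perA, on nonempty groups
lemma groupLoopA_eq_all (l : List (Option Int × List Int)) (h : ∀ p ∈ l, p.2 ≠ []) :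
    groupLoopA l = l.all perA := by
  induction l with
  | nil => rfl
  | cons p rest ih =>
    obtain ⟨disc, nums⟩ := p
    have hne : nums ≠ [] := h (disc, nums) List.mem_cons_self
    have hrest := ih (fun q hq => h q (List.mem_cons_of_mem _ hq))
    have hper := perGroup_eq disc nums hne
    rw [List.all_cons, ← hper, ← hrest]
    cases disc with
    | none => rfl
    | some d =>
      simp only [groupLoopA]
      by_cases h0 : PySem.List.pyGetD (PySem.List.sorted nums (fun x => x)) 0 0 ≠ 1
      · rw [if_pos h0, if_pos h0]; rfl
      · rw [if_neg h0, if_neg h0]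
        by_cases h1 : consecLoopA (PySem.List.sorted nums (fun x => x)) 1 = false
        · rw [if_pos h1, if_pos h1]; rfl
        · rw [if_neg h1, if_neg h1]; simp

-- the grouping fold, over the (disc, int) pairs
lemma fold_as_map (entries : List (Option Int × String × String)) :
    entries.foldl
      (fun d e => PySem.Dict.modify d e.1 [] (fun l => l ++ [pyInt e.2.1]))
      PySem.Dict.empty
    = ((entries.map (fun e => (e.1, pyInt e.2.1))).foldl
        (fun d p => PySem.Dict.modify d p.1 [] (fun l => l ++ [p.2]))
        PySem.Dict.empty) := by
  rw [List.foldl_map]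

lemma keys_groups (entries : List (Option Int × String × String)) :
    ∀ k, k ∈ (entries.foldl
      (fun d e => PySem.Dict.modify d e.1 [] (fun l => l ++ [pyInt e.2.1]))
      PySem.Dict.empty).keys ↔ k ∈ entries.map (fun e => e.1) := by
  intro k
  rw [fold_as_map]
  have hkeys : ((entries.map (fun e => (e.1, pyInt e.2.1))).foldl
        (fun d p => PySem.Dict.modify d p.1 [] (fun l => l ++ [p.2]))
        PySem.Dict.empty).keys
      = PySem.Set.update (PySem.Dict.empty : PySem.Dict (Option Int) (List Int)).keys
          ((entries.map (fun e => (e.1, pyInt e.2.1))).map (fun p => p.1)) :=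
    PySem.Dict.keys_foldl_modify_key (entries.map (fun e => (e.1, pyInt e.2.1)))
      (fun p => p.1) [] (fun d p => fun ls => ls ++ [p.2]) PySem.Dict.empty
  rw [hkeys, PySem.Set.mem_update]
  simp [PySem.Dict.keys_empty, List.map_map]

lemma nodup_keys_groups (entries : List (Option Int × String × String)) :
    (entries.foldl
      (fun d e => PySem.Dict.modify d e.1 [] (fun l => l ++ [pyInt e.2.1]))
      PySem.Dict.empty).keys.Nodup := by
  rw [fold_as_map]
  exact PySem.Dict.nodup_keys_foldl_modify_key (entries.map (fun e => (e.1, pyInt e.2.1)))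
    (fun p => p.1) [] (fun d p => fun ls => ls ++ [p.2]) PySem.Dict.empty
    (by simp [PySem.Dict.keys_empty])

lemma getD_groups (entries : List (Option Int × String × String)) (k : Option Int) :
    (entries.foldl
      (fun d e => PySem.Dict.modify d e.1 [] (fun l => l ++ [pyInt e.2.1]))
      PySem.Dict.empty).getD k [] = groupOf entries k := by
  rw [fold_as_map, PySem.Dict.getD_foldl_modify_append]
  rw [List.filter_map]
  simp only [PySem.Dict.getD_empty, List.nil_append, List.map_map, groupOf]
  rfl

-- every group the fold builds is nonempty
lemma groups_nonempty (entries : List (Option Int × String × String)) :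
    ∀ p ∈ (entries.foldl
      (fun d e => PySem.Dict.modify d e.1 [] (fun l => l ++ [pyInt e.2.1]))
      PySem.Dict.empty).items, p.2 ≠ [] := by
  intro p hp
  obtain ⟨k, v⟩ := p
  have hnodup := nodup_keys_groups entries
  have hv := PySem.Dict.getD_of_mem_items _ hp hnodup []
  have hk : k ∈ entries.map (fun e => e.1) :=
    (keys_groups entries k).mp (PySem.Dict.mem_keys_of_mem_items _ hp)
  rw [getD_groups] at hv
  obtain ⟨e, he, hek⟩ := List.mem_map.mp hk
  intro hveq
  rw [show v = [] from hveq] at hv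
  have hmem : e ∈ entries.filter (fun e' => e'.1 == k) :=
    List.mem_filter.mpr ⟨he, by simp [hek]⟩
  have : (entries.filter (fun e' => e'.1 == k)) = [] :=
    List.map_eq_nil_iff.mp hv
  rw [this] at hmem
  cases hmem

-- A's condition 1 characterised: all discs present, each disc's sorted group is 1..k
lemma condA1_iff (entries : List (Option Int × String × String)) :
    groupLoopA ((entries.foldl
        (fun d e => PySem.Dict.modify d e.1 [] (fun l => l ++ [pyInt e.2.1]))
        PySem.Dict.empty).items) = true ↔
      ∀ k ∈ entries.map (fun e => e.1), k.isSome = true ∧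
        PySem.List.sorted (groupOf entries k) (fun x => x)
          = PySem.List.pyRange 1 (((groupOf entries k).length : Int) + 1) 1 := by
  set d := entries.foldl
      (fun d e => PySem.Dict.modify d e.1 [] (fun l => l ++ [pyInt e.2.1]))
      PySem.Dict.empty with hd
  rw [groupLoopA_eq_all _ (groups_nonempty entries)]
  rw [PySem.Dict.items_eq_map_keys d (nodup_keys_groups entries) []]
  rw [List.all_map, List.all_eq_true]
  constructor
  · intro h k hk
    have := h k ((keys_groups entries k).mpr hk)
    simp only [Function.comp, perA, Bool.and_eq_true, decide_eq_true_eq, hd, getD_groups] at this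
    exact ⟨this.1, this.2⟩
  · intro h k hk
    have hk' := (keys_groups entries k).mp hk
    obtain ⟨h1, h2⟩ := h k hk'
    simp only [Function.comp, perA, Bool.and_eq_true, decide_eq_true_eq, hd, getD_groups]
    exact ⟨h1, h2⟩

-- ===== B's fold in terms of good1/good2 =====

lemma foldB_some (l : List (Option Int × String × String)) :
    ∀ (c1 c2 : Bool) (p : Option Int × Int),
      l.foldl stepB (c1, c2, some p) = (c1 && scan1 p l, c2 && scan2 p.2 l, some (trail p l)) := by
  induction l with
  | nil => intro c1 c2 p; simp [scan1, scan2, trail]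
  | cons e r ih =>
    intro c1 c2 p
    obtain ⟨pd, pn⟩ := p
    rw [List.foldl_cons]
    show List.foldl stepB
      (if e.1 = none ∨ pyInt e.2.1 ≠ (if e.1 = pd then pn + 1 else 1) then false else c1,
       if pyInt e.2.1 ≤ pn then false else c2, some (e.1, pyInt e.2.1)) r = _
    rw [ih]
    simp only [scan1, scan2, trail, nOf]
    by_cases hC : e.1 = none ∨ pyInt e.2.1 ≠ (if e.1 = pd then pn + 1 else 1) <;>
      by_cases hD : pyInt e.2.1 ≤ pn <;>
      simp [hC, hD]

lemma foldB_eq (l : List (Option Int × String × String)) :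
    (l.foldl stepB (true, true, none)).1 = good1 l ∧
    (l.foldl stepB (true, true, none)).2.1 = good2 l := by
  cases l with
  | nil => exact ⟨rfl, rfl⟩
  | cons e r =>
    rw [List.foldl_cons,
      show stepB (true, true, none) e
        = (if e.1 = none ∨ pyInt e.2.1 ≠ 1 then false else true, true, some (e.1, pyInt e.2.1))
        from rfl,
      foldB_some]
    constructor
    · simp only [good1, nOf]
      by_cases hC : e.1 = none ∨ pyInt e.2.1 ≠ 1 <;> simp [hC]
    · simp [good2, nOf]

-- ===== condition 2: A's loop = B's scan =====

lemma cond2LoopA_eq_pairAll (se : List (Option Int × String × String)) :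
    ∀ i, cond2LoopA se (i + 1) = pairAll (se.drop i) := by
  suffices H : ∀ m i, se.length - i ≤ m → cond2LoopA se (i + 1) = pairAll (se.drop i) by
    exact fun i => H se.length i (by omega)
  intro m
  induction m with
  | zero =>
    intro i h
    have hi : ¬ i + 1 < se.length := by omega
    rw [cond2LoopA, dif_neg hi]
    rw [List.drop_eq_nil_of_le (by omega)]
    rfl
  | succ m ih =>
    intro i h
    rw [cond2LoopA]
    by_cases hi : i + 1 < se.length
    · rw [dif_pos hi]
      have h0 : i < se.length := by omega
      have hdrop : se.drop i = se[i] :: se.drop (i + 1) := (List.getElem_cons_drop h0).symm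
      have hdrop1 : se.drop (i + 1) = se[i + 1] :: se.drop (i + 2) := (List.getElem_cons_drop hi).symm
      rw [hdrop, hdrop1, pairAll]
      have g0 : se.getD (i + 1 - 1) (none, "", "") = se[i] := by
        simp [List.getD, h0]
      have g1 : se.getD (i + 1) (none, "", "") = se[i + 1] := by
        simp [List.getD, hi]
      rw [g0, g1]
      rw [← hdrop1, ih (i + 1) (by omega)]
      by_cases hle : pyInt se[i + 1].2.1 ≤ pyInt se[i].2.1
      · rw [if_pos hle]
        have : ¬ pyInt se[i].2.1 < pyInt se[i + 1].2.1 := by omega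
        simp [this]
      · rw [if_neg hle]
        have : pyInt se[i].2.1 < pyInt se[i + 1].2.1 := by omega
        simp [this]
    · rw [dif_neg hi]
      by_cases h0 : i < se.length
      · have hdrop : se.drop i = se[i] :: se.drop (i + 1) := (List.getElem_cons_drop h0).symm
        rw [List.drop_eq_nil_of_le (by omega : se.length ≤ i + 1)] at hdrop
        rw [hdrop]; rfl
      · rw [List.drop_eq_nil_of_le (by omega)]; rfl

lemma scan2_eq_pairAll (l : List (Option Int × String × String)) :
    ∀ a, scan2 (nOf a) l = pairAll (a :: l) := by
  induction l with
  | nil => intro a; rfl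
  | cons b r ih =>
    intro a
    rw [scan2, pairAll, ih b]
    congr 1
    rw [Bool.eq_iff_iff]
    simp only [nOf, Bool.not_eq_true', decide_eq_false_iff_not, decide_eq_true_eq]
    omega

lemma good2_eq_pairAll (l : List (Option Int × String × String)) :
    good2 l = pairAll l := by
  cases l with
  | nil => rfl
  | cons e r => rw [good2, scan2_eq_pairAll]

-- ===== the sorted list is Pairwise LexLe =====

lemma lexR_trans (a b c : Option Int × String × String)
    (h1 : lexR a b = true) (h2 : lexR b c = true) : lexR a c = true := by
  simp only [lexR, Bool.or_eq_true, Bool.and_eq_true, Bool.not_eq_true', decide_eq_true_eq,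
    decide_eq_false_iff_not] at h1 h2 ⊢
  omega

lemma lexR_asymm (a b : Option Int × String × String)
    (h : lexR a b = true) : lexR b a = false := by
  simp only [lexR, Bool.or_eq_true, Bool.and_eq_true, Bool.not_eq_true', decide_eq_true_eq,
    decide_eq_false_iff_not] at h
  simp only [lexR, Bool.or_eq_false_iff, Bool.and_eq_false_iff, Bool.not_eq_false',
    decide_eq_false_iff_not, decide_eq_true_eq]
  omega

lemma lexR_false_iff (a b : Option Int × String × String) :
    lexR b a = false ↔ LexLe a b := by
  simp only [lexR, LexLe, Bool.or_eq_false_iff, Bool.and_eq_false_iff, Bool.not_eq_false',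
    decide_eq_false_iff_not, decide_eq_true_eq]
  omega

lemma pairwise_insertBy_lex (x : Option Int × String × String)
    (l : List (Option Int × String × String))
    (h : l.Pairwise (fun a b => lexR b a = false)) :
    (PySem.List.insertBy lexR x l).Pairwise (fun a b => lexR b a = false) := by
  induction l with
  | nil => simp [PySem.List.insertBy]
  | cons y ys ih =>
    rw [List.pairwise_cons] at h
    obtain ⟨hy, hys⟩ := h
    show (PySem.List.insertBy lexR x (y :: ys)).Pairwise (fun a b => lexR b a = false)
    rw [PySem.List.insertBy]
    by_cases hxy : lexR x y = true
    · rw [if_pos hxy]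
      rw [List.pairwise_cons]
      constructor
      · intro z hz
        rcases List.mem_cons.mp hz with rfl | hz'
        · exact lexR_asymm x z hxy
        · cases hzx : lexR z x with
          | false => rfl
          | true =>
            have := lexR_trans z x y hzx hxy
            rw [hy z hz'] at this
            cases this
      · rw [List.pairwise_cons]
        exact ⟨hy, hys⟩
    · rw [if_neg hxy]
      rw [List.pairwise_cons]
      constructor
      · intro z hz
        rcases (PySem.List.mem_insertBy lexR x z ys).mp hz with rfl | hz'
        · exact Bool.eq_false_iff.mpr hxy
        · exact hy z hz'
      · exact ih hys

lemma sorted2_pairwise_lex (entries : List (Option Int × String × String)) :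
    (PySem.List.sorted2 entries (fun x => x.1.getD 0) (fun x => pyInt x.2.1)).Pairwise LexLe := by
  have hdef : PySem.List.sorted2 entries (fun x => x.1.getD 0) (fun x => pyInt x.2.1)
      = entries.foldl (fun acc x => PySem.List.insertBy lexR x acc) [] := rfl
  rw [hdef]
  have H : ∀ (l acc : List (Option Int × String × String)),
      acc.Pairwise (fun a b => lexR b a = false) →
      (l.foldl (fun acc x => PySem.List.insertBy lexR x acc) acc).Pairwise
        (fun a b => lexR b a = false) := by
    intro l
    induction l with
    | nil => intro acc h; exact h
    | cons e r ih => intro acc h; exact ih _ (pairwise_insertBy_lex e acc h)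
  exact (H entries [] (by simp)).imp (fun hab => (lexR_false_iff _ _).mp hab)

-- ===== RF recursion lemmas =====

lemma RF_nil (s : Int) : RF s [] := by
  unfold RF
  have h0 : (PySem.List.pyRange s (s + (([] : List Int).length : Int)) 1).length = 0 := by
    rw [PySem.List.length_pyRange_one]; simp
  exact (List.length_eq_zero_iff.mp h0).symm

lemma RF_cons (s n : Int) (ns : List Int) : RF s (n :: ns) ↔ n = s ∧ RF (s + 1) ns := by
  unfold RF
  have hlen : (n :: ns).length = ns.length + 1 := rfl
  have hlt : s < s + (((n :: ns).length : Nat) : Int) := by rw [hlen]; push_cast; omega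
  rw [PySem.List.pyRange_one_cons hlt]
  have harg : s + (((n :: ns).length : Nat) : Int) = s + 1 + (ns.length : Int) := by
    rw [hlen]; push_cast; ring
  rw [harg]
  constructor
  · intro h
    exact ⟨List.head_eq_of_cons_eq h, List.tail_eq_of_cons_eq h⟩
  · rintro ⟨rfl, h2⟩
    rw [← h2]

-- ===== workhorse: B's scan over a sorted list ↔ per-disc consecutive groups =====

lemma scan1_iff (l : List (Option Int × String × String)) (hs : l.Pairwise LexLe)
    (d : Int) (hd : ∀ e ∈ l, d ≤ key1 e) (m : Int) :
    scan1 (some d, m) l = true ↔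
      (RF (m + 1) (groupOf l (some d)) ∧
       ∀ k ∈ l.map (fun e => e.1), k ≠ some d → k.isSome = true ∧ RF 1 (groupOf l k)) := by
  induction l generalizing d m with
  | nil =>
    constructor
    · intro _
      refine ⟨RF_nil _, ?_⟩
      intro k hk
      simp at hk
    · intro _; rfl
  | cons e r ih =>
    rw [List.pairwise_cons] at hs
    obtain ⟨he, hr⟩ := hs
    have hdr : ∀ e' ∈ r, d ≤ key1 e' := fun e' he' => hd e' (List.mem_cons_of_mem _ he')
    rw [scan1, Bool.and_eq_true]
    by_cases hnone : e.1 = none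
    · constructor
      · rintro ⟨h1, _⟩
        exfalso
        simp [hnone] at h1
      · rintro ⟨_, hall⟩
        exfalso
        have := (hall e.1 (by simp) (by rw [hnone]; simp)).1
        rw [hnone] at this
        simp at this
    · obtain ⟨d', hd'⟩ := Option.ne_none_iff_exists'.mp hnone
      have hkey : key1 e = d' := by simp [key1, hd']
      by_cases hsame : e.1 = some d
      · -- the head continues the current disc's block
        have hgrp : groupOf (e :: r) (some d) = nOf e :: groupOf r (some d) := by
          simp [groupOf, hsame, nOf]
        have hgrpk : ∀ k, k ≠ some d → groupOf (e :: r) k = groupOf r k := by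
          intro k hk
          have hne : (e.1 == k) = false := by
            simp only [beq_eq_false_iff_ne, ne_eq]
            exact fun h => hk (hsame.symm.trans h).symm
          simp [groupOf, hne]
        constructor
        · rintro ⟨h1, h2⟩
          rw [if_pos hsame] at h1
          have hn : nOf e = m + 1 := by
            simp only [Bool.not_eq_eq_eq_not, Bool.not_true, decide_eq_false_iff_not,
              not_or, not_not] at h1
            exact h1.2
          rw [hsame] at h2
          have hrec := (ih hr d hdr (nOf e)).mp h2
          refine ⟨?_, ?_⟩
          · rw [hgrp, RF_cons]
            exact ⟨hn, by rw [← hn]; exact hrec.1⟩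
          · intro k hk hkd
            rw [List.map_cons] at hk
            rcases List.mem_cons.mp hk with rfl | hk'
            · exact absurd hsame hkd
            · obtain ⟨hs1, hs2⟩ := hrec.2 k hk' hkd
              exact ⟨hs1, by rw [hgrpk k hkd]; exact hs2⟩
        · rintro ⟨h1, h2⟩
          rw [hgrp, RF_cons] at h1
          obtain ⟨hn, hrest⟩ := h1
          constructor
          · rw [if_pos hsame]
            simp [hnone, hn]
          · rw [hsame]
            apply (ih hr d hdr (nOf e)).mpr
            refine ⟨by rw [hn]; exact hrest, ?_⟩
            intro k hk hkd
            obtain ⟨hs1, hs2⟩ := h2 k (by rw [List.map_cons]; exact List.mem_cons_of_mem _ hk) hkd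
            exact ⟨hs1, by rw [← hgrpk k hkd]; exact hs2⟩
      · -- a new disc starts here
        have hdd' : d < d' := by
          have h := hd e List.mem_cons_self
          rw [hkey] at h
          rcases lt_or_eq_of_le h with h' | h'
          · exact h'
          · exact absurd (by rw [hd', ← h']) hsame
        have hdr' : ∀ e' ∈ r, d' ≤ key1 e' := by
          intro e' he'
          have h := (he e' he').1
          rwa [hkey] at h
        have hgr_d : groupOf r (some d) = [] := by
          rw [groupOf, List.map_eq_nil_iff, List.filter_eq_nil_iff]
          intro e' he' hbeq
          have h1 : e'.1 = some d := by simpa using hbeq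
          have h2 := hdr' e' he'
          rw [key1, h1] at h2
          simp at h2
          omega
        have hnotin : (some d) ∉ r.map (fun e => e.1) := by
          intro hmem
          obtain ⟨e', he', heq⟩ := List.mem_map.mp hmem
          have hmem2 : e' ∈ r.filter (fun e'' => e''.1 == some d) :=
            List.mem_filter.mpr ⟨he', by simp [heq]⟩
          have hnil : r.filter (fun e'' => e''.1 == some d) = [] := by
            rw [groupOf, List.map_eq_nil_iff] at hgr_d
            exact hgr_d
          rw [hnil] at hmem2
          cases hmem2
        have hgrp0 : groupOf (e :: r) (some d) = [] := by
          have hne : (e.1 == some d) = false := by simp [hsame]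
          simp only [groupOf, List.filter_cons, hne, Bool.false_eq_true, if_false]
          rw [groupOf] at hgr_d
          exact hgr_d
        have hgrp' : groupOf (e :: r) (some d') = nOf e :: groupOf r (some d') := by
          simp [groupOf, hd', nOf]
        have hgrpk : ∀ k, k ≠ some d' → groupOf (e :: r) k = groupOf r k := by
          intro k hk
          have hne : (e.1 == k) = false := by
            simp only [beq_eq_false_iff_ne, ne_eq]
            exact fun h => hk (hd'.symm.trans h).symm
          simp [groupOf, hne]
        have hdd'' : some d' ≠ some d := by
          intro hc
          have := Option.some.inj hc
          omega
        constructor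
        · rintro ⟨h1, h2⟩
          rw [if_neg hsame] at h1
          have hn : nOf e = 1 := by
            simp only [Bool.not_eq_eq_eq_not, Bool.not_true, decide_eq_false_iff_not,
              not_or, not_not] at h1
            exact h1.2
          rw [hd'] at h2
          have hrec := (ih hr d' hdr' (nOf e)).mp h2
          refine ⟨by rw [hgrp0]; exact RF_nil _, ?_⟩
          intro k hk hkd
          rw [List.map_cons] at hk
          rcases List.mem_cons.mp hk with rfl | hk'
          · refine ⟨by rw [hd']; rfl, ?_⟩
            rw [hd', hgrp', RF_cons]
            refine ⟨hn, ?_⟩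
            have h3 := hrec.1
            rw [hn] at h3
            exact h3
          · by_cases hkd' : k = some d'
            · refine ⟨by rw [hkd']; rfl, ?_⟩
              rw [hkd', hgrp', RF_cons]
              refine ⟨hn, ?_⟩
              have h3 := hrec.1
              rw [hn] at h3
              exact h3
            · obtain ⟨hs1, hs2⟩ := hrec.2 k hk' hkd'
              exact ⟨hs1, by rw [hgrpk k hkd']; exact hs2⟩
        · rintro ⟨_, hall⟩
          have hd'' := hall (some d')
            (by rw [List.map_cons, hd']; exact List.mem_cons_self) hdd''
          obtain ⟨_, hrf⟩ := hd''
          rw [hgrp', RF_cons] at hrf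
          obtain ⟨hn, hrest⟩ := hrf
          constructor
          · rw [if_neg hsame]
            simp [hnone, hn]
          · rw [hd']
            apply (ih hr d' hdr' (nOf e)).mpr
            refine ⟨by rw [hn]; exact hrest, ?_⟩
            intro k hk hkd'
            have hkd : k ≠ some d := by
              intro hc
              rw [hc] at hk
              exact hnotin hk
            obtain ⟨hs1, hs2⟩ := hall k
              (by rw [List.map_cons]; exact List.mem_cons_of_mem _ hk) hkd
            exact ⟨hs1, by rw [← hgrpk k hkd']; exact hs2⟩

lemma good1_iff (l : List (Option Int × String × String)) (hs : l.Pairwise LexLe) :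
    good1 l = true ↔
      ∀ k ∈ l.map (fun e => e.1), k.isSome = true ∧ RF 1 (groupOf l k) := by
  cases l with
  | nil =>
    constructor
    · intro _ k hk; simp at hk
    · intro _; rfl
  | cons e r =>
    rw [List.pairwise_cons] at hs
    obtain ⟨he, hr⟩ := hs
    rw [good1, Bool.and_eq_true]
    by_cases hnone : e.1 = none
    · constructor
      · rintro ⟨h1, _⟩
        exfalso
        simp [hnone] at h1
      · intro hall
        exfalso
        have := (hall e.1 (by simp)).1
        rw [hnone] at this
        simp at this
    · obtain ⟨d', hd'⟩ := Option.ne_none_iff_exists'.mp hnone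
      have hkey : key1 e = d' := by simp [key1, hd']
      have hdr' : ∀ e' ∈ r, d' ≤ key1 e' := fun e' he' => by
        have h := (he e' he').1
        rwa [hkey] at h
      have hgrp' : groupOf (e :: r) (some d') = nOf e :: groupOf r (some d') := by
        simp [groupOf, hd', nOf]
      have hgrpk : ∀ k, k ≠ some d' → groupOf (e :: r) k = groupOf r k := by
        intro k hk
        have hne : (e.1 == k) = false := by
          simp only [beq_eq_false_iff_ne, ne_eq]
          exact fun h => hk (hd'.symm.trans h).symm
        simp [groupOf, hne]
      constructor
      · rintro ⟨h1, h2⟩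
        have hn : nOf e = 1 := by
          simp only [Bool.not_eq_eq_eq_not, Bool.not_true, decide_eq_false_iff_not,
            not_or, not_not] at h1
          exact h1.2
        rw [hd'] at h2
        have hrec := (scan1_iff r hr d' hdr' (nOf e)).mp h2
        intro k hk
        rw [List.map_cons] at hk
        rcases List.mem_cons.mp hk with rfl | hk'
        · refine ⟨by rw [hd']; rfl, ?_⟩
          rw [hd', hgrp', RF_cons]
          refine ⟨hn, ?_⟩
          have h3 := hrec.1
          rw [hn] at h3
          exact h3
        · by_cases hkd' : k = some d'
          · refine ⟨by rw [hkd']; rfl, ?_⟩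
            rw [hkd', hgrp', RF_cons]
            refine ⟨hn, ?_⟩
            have h3 := hrec.1
            rw [hn] at h3
            exact h3
          · obtain ⟨hs1, hs2⟩ := hrec.2 k hk' hkd'
            exact ⟨hs1, by rw [hgrpk k hkd']; exact hs2⟩
      · intro hall
        have hd'' := hall (some d') (by rw [List.map_cons, hd']; exact List.mem_cons_self)
        obtain ⟨_, hrf⟩ := hd''
        rw [hgrp', RF_cons] at hrf
        obtain ⟨hn, hrest⟩ := hrf
        constructor
        · simp [hnone, hn]
        · rw [hd']
          apply (scan1_iff r hr d' hdr' (nOf e)).mpr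
          refine ⟨by rw [hn]; exact hrest, ?_⟩
          intro k hk hkd'
          obtain ⟨hs1, hs2⟩ := hall k (by rw [List.map_cons]; exact List.mem_cons_of_mem _ hk)
          exact ⟨hs1, by rw [← hgrpk k hkd']; exact hs2⟩

-- ===== bridging the per-disc groups of the sorted list and of the original =====

lemma group_bridge (entries : List (Option Int × String × String)) (k : Option Int)
    (hk : k.isSome = true)
    (hs : (PySem.List.sorted2 entries (fun x => x.1.getD 0) (fun x => pyInt x.2.1)).Pairwise LexLe) :
    (RF 1 (groupOf (PySem.List.sorted2 entries (fun x => x.1.getD 0) (fun x => pyInt x.2.1)) k) ↔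
      PySem.List.sorted (groupOf entries k) (fun x => x)
        = PySem.List.pyRange 1 (((groupOf entries k).length : Int) + 1) 1) := by
  have hperm : (PySem.List.sorted2 entries (fun x => x.1.getD 0)
      (fun x => pyInt x.2.1)).Perm entries := PySem.List.sorted2_perm entries _ _ false
  generalize hgen : PySem.List.sorted2 entries (fun x => x.1.getD 0) (fun x => pyInt x.2.1) = se
    at hperm hs ⊢
  set X := groupOf se k with hX
  set Y := groupOf entries k with hY
  have hXY : X.Perm Y := by
    rw [hX, hY, groupOf, groupOf]
    apply List.Perm.map
    apply List.Perm.filter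
    exact hperm
  have hlen : X.length = Y.length := hXY.length_eq
  have hRX : PySem.List.pyRange 1 (1 + (X.length : Int)) 1
      = PySem.List.pyRange 1 ((Y.length : Int) + 1) 1 := by
    rw [hlen]
    congr 1
    ring
  constructor
  · intro hRF
    rw [RF] at hRF
    rw [hRX] at hRF
    have hlt : X.Pairwise (fun a b => a < b) := by
      rw [hRF]
      exact PySem.List.pairwise_lt_pyRange_one _ _
    have := PySem.List.sorted_eq_of_perm_of_pairwise_lt Y X (fun x => x) hXY hlt
    rw [this, hRF]
  · intro hsort
    obtain ⟨dv, hdv⟩ := Option.isSome_iff_exists.mp hk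
    have hfil : (se.filter (fun e => e.1 == k)).Pairwise (fun a b => nOf a ≤ nOf b) := by
      refine List.Pairwise.imp_of_mem ?_ (hs.filter (fun e => e.1 == k))
      intro a b ha hb hab
      have hak : a.1 = k := by simpa using (List.mem_filter.mp ha).2
      have hbk : b.1 = k := by simpa using (List.mem_filter.mp hb).2
      exact hab.2 (by simp [key1, hak, hbk])
    have hXle : X.Pairwise (fun a b => a ≤ b) := by
      rw [hX, groupOf]
      exact List.pairwise_map.mpr hfil
    have hXs : PySem.List.sorted X (fun x => x) = X :=
      PySem.List.sorted_eq_self_of_pairwise X (fun x => x) hXle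
    have hsX : PySem.List.sorted X (fun x => x) = PySem.List.sorted Y (fun x => x) :=
      (PySem.List.sorted_id_eq_sorted_id_iff_perm X Y).mpr hXY
    rw [RF, hRX]
    rw [← hXs, hsX, hsort]

-- ===== VERDICT (by name: the statement is the Claim_ definition above) =====
theorem tracks_in_order_py_spec : Claim_equal_tracks_in_order_py := by
  intro entries _ _
  unfold Spec_tracks_in_order_py
  show tracks_in_order_py entries = tracks_in_order_py_alt entries
  dsimp only [tracks_in_order_py, tracks_in_order_py_alt]
  set se := PySem.List.sorted2 entries (fun x => x.1.getD 0) (fun x => pyInt x.2.1) with hse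
  have hfold := foldB_eq se
  rw [hfold.1, hfold.2]
  have hpw := sorted2_pairwise_lex entries
  rw [← hse] at hpw
  have hperm : se.Perm entries := by
    rw [hse]; exact PySem.List.sorted2_perm entries _ _ false
  -- condition 2
  have hc2 : cond2LoopA se 1 = good2 se := by
    rw [good2_eq_pairAll, show (1 : Nat) = 0 + 1 from rfl, cond2LoopA_eq_pairAll, List.drop_zero]
  -- condition 1
  have hc1 : groupLoopA ((entries.foldl
      (fun d e => PySem.Dict.modify d e.1 [] (fun l => l ++ [pyInt e.2.1]))
      PySem.Dict.empty).items) = good1 se := by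
    rw [Bool.eq_iff_iff, condA1_iff entries, good1_iff se hpw]
    have hmapmem : ∀ k, k ∈ se.map (fun e => e.1) ↔ k ∈ entries.map (fun e => e.1) := by
      intro k; exact (hperm.map (fun e => e.1)).mem_iff
    constructor
    · intro h k hk
      have hk' := (hmapmem k).mp hk
      obtain ⟨hsome, hrange⟩ := h k hk'
      exact ⟨hsome, (group_bridge entries k hsome hpw).mpr hrange⟩
    · intro h k hk
      have hk' := (hmapmem k).mpr hk
      obtain ⟨hsome, hrf⟩ := h k hk'
      exact ⟨hsome, (group_bridge entries k hsome hpw).mp hrf⟩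
  rw [hc1, hc2]
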